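-- pv_equiv track=rewrite | github.com/HoveringGoat/LeetCodeProblems | 36.valid-sudoku.py | isValidSubSection
-- ===== SOURCE A (Python) =====
-- from typing import List
--
-- def isValidSubSection(subsection: List[str]) -> bool:
--     tempDict = {}
--     for i in subsection:
--         if i == ".":
--             continue
--         if i in tempDict:
--             return False
--         tempDict[i] = True
--     return True
-- ===== SOURCE B (Python) =====
-- def isValidSubSection(subsection):
--     vals = sorted(c for c in subsection if c != ".")
--     return all(x != y for x, y in zip(vals, vals[1:]))
-- ===== Notes on version B (the rewrite author's own statement) =====
-- stated objective: alternative
-- what changed: Replaced A's single-pass seen-dict scan with early exit by a sort of the non-dot values followed by an adjacent-pair equality scan (duplicates are adjacent after sorting); no hash container or membership test remains.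
import Mathlib
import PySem

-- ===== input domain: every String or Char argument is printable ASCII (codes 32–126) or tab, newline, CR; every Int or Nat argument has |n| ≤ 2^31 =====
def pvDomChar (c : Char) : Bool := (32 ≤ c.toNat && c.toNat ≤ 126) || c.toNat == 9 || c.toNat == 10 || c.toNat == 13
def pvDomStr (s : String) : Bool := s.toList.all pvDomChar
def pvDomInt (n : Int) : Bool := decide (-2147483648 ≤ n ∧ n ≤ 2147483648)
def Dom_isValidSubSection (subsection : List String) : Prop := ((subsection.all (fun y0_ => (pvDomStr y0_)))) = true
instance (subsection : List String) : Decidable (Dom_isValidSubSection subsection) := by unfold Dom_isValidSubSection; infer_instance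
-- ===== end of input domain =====

-- B replaces A's early-exit seen-dict scan by sorting the non-dot values and scanning adjacent pairs for equality (duplicates are adjacent after sorting); alternative algorithm, no hash container.


-- ===== PORT A =====
-- loop of A: scan with the seen-dict, early return False on a repeat
def isValidSubSectionGo (tempDict : PySem.Dict String Bool) : List String → Bool
  | [] => true
  | i :: rest =>
    if i == "." then isValidSubSectionGo tempDict rest
    else if tempDict.contains i then false
    else isValidSubSectionGo (tempDict.insert i true) rest

def isValidSubSection (subsection : List String) : Bool :=
  isValidSubSectionGo PySem.Dict.empty subsection

-- ===== PORT B =====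
-- vals = sorted(non-dot values); all(x != y for x, y in zip(vals, vals[1:])): vals[1:] is vals.tail
def isValidSubSection_alt (subsection : List String) : Bool :=
  let vals := PySem.List.sorted (subsection.filter (fun c => c != ".")) (fun x => x) false
  (vals.zip vals.tail).all (fun p => p.1 != p.2)

-- ===== PRECONDITION & SPEC =====
def Spec_isValidSubSection (subsection : List String) (out : Bool) : Prop := out = isValidSubSection_alt subsection
instance (subsection : List String) (out : Bool) : Decidable (Spec_isValidSubSection subsection out) := by unfold Spec_isValidSubSection; infer_instance

-- ===== CLAIM (what is proved, stated in full; the proofs are below) =====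
def Claim_equal_isValidSubSection : Prop := ∀ (subsection : List String), Dom_isValidSubSection subsection → Spec_isValidSubSection subsection (isValidSubSection subsection)

-- ===== LEMMAS AND PROOFS =====

-- A's loop computes: the filtered suffix is duplicate-free and disjoint from the seen keys.
lemma goA_eq (l : List String) : ∀ d : PySem.Dict String Bool,
    isValidSubSectionGo d l =
      decide ((l.filter (fun c => c != ".")).Nodup ∧
        ∀ x ∈ l.filter (fun c => c != "."), d.contains x = false) := by
  induction l with
  | nil => intro d; simp [isValidSubSectionGo]
  | cons i rest ih =>
    intro d
    simp only [isValidSubSectionGo]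
    by_cases hdot : i = "."
    · subst hdot
      rw [if_pos (by simp)]
      rw [ih d]
      simp
    · rw [if_neg (by simp [hdot])]
      have hfil : (i :: rest).filter (fun c => c != ".") =
          i :: rest.filter (fun c => c != ".") := by simp [hdot]
      rw [hfil]
      by_cases hin : d.contains i = true
      · rw [if_pos hin]
        symm
        simp only [decide_eq_false_iff_not, not_and]
        intro _ h
        have := h i (by simp)
        simp [hin] at this
      · rw [if_neg hin]
        rw [ih (d.insert i true)]
        have hinf : d.contains i = false := by
          cases h : d.contains i <;> simp_all
        congr 1
        simp only [List.nodup_cons, eq_iff_iff]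
        constructor
        · rintro ⟨hnd, hall⟩
          refine ⟨⟨fun hmem => ?_, hnd⟩, ?_⟩
          · have := hall i hmem
            rw [PySem.Dict.contains_insert] at this
            simp at this
          · intro x hxm
            rcases List.mem_cons.mp hxm with rfl | hx2
            · exact hinf
            · have := hall x hx2
              rw [PySem.Dict.contains_insert] at this
              simp at this
              exact this.2
        · rintro ⟨⟨hmem, hnd⟩, hall⟩
          refine ⟨hnd, fun x hx => ?_⟩
          rw [PySem.Dict.contains_insert]
          have hmemf : x ∈ List.filter (fun c => c != ".") rest := hx
          have hxne : x ≠ i := fun he => hmem (he ▸ hmemf)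
          simp [hxne]
          exact hall x (List.mem_cons_of_mem _ hmemf)

-- On a list sorted (Pairwise ≤), the adjacent-pairs-all-distinct scan decides Nodup.
lemma adj_scan_nodup (l : List String) (hs : l.Pairwise (· ≤ ·)) :
    ((l.zip l.tail).all (fun p => p.1 != p.2)) = decide l.Nodup := by
  induction l with
  | nil => simp
  | cons a t ih =>
    cases t with
    | nil => simp
    | cons b t2 =>
      have hle : a ≤ b := (List.pairwise_cons.mp hs).1 b (by simp)
      have hs2 : (b :: t2).Pairwise (· ≤ ·) := (List.pairwise_cons.mp hs).2
      have ih2 := ih hs2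
      simp only [List.tail_cons, List.zip_cons_cons, List.all_cons] at ih2 ⊢
      by_cases hab : a = b
      · subst hab
        simp [List.nodup_cons]
      · have h1 : (a != b) = true := by simp [hab]
        rw [h1, Bool.true_and, ih2]
        have hnm : a ∉ b :: t2 → ((b :: t2).Nodup ↔ (a :: b :: t2).Nodup) := by
          intro h; simp [List.nodup_cons, h]
        by_cases hn : (b :: t2).Nodup
        · -- a < b ≤ everything in b :: t2, so a is not a member
          have hamem : a ∉ b :: t2 := by
            intro hm
            have halt : a < b := lt_of_le_of_ne hle hab
            rcases List.mem_cons.mp hm with rfl | hm2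
            · exact hab rfl
            · have := List.pairwise_cons.mp hs2
              have hble : b ≤ a := this.1 a hm2
              exact absurd (lt_of_lt_of_le halt hble) (lt_irrefl a)
          simp [List.nodup_cons, hn, hamem]
        · simp [List.nodup_cons, hn]

-- B computes: the filtered values are duplicate-free.
lemma alt_eq_nodup (subsection : List String) :
    isValidSubSection_alt subsection =
      decide (subsection.filter (fun c => c != ".")).Nodup := by
  unfold isValidSubSection_alt
  set fl := subsection.filter (fun c => c != ".") with hfl
  set vals := PySem.List.sorted fl (fun x => x) false with hv
  have hp : vals.Pairwise (· ≤ ·) := by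
    have := PySem.List.sorted_pairwise (xs := fl) (key := fun x => x)
    simpa [hv] using this
  rw [adj_scan_nodup vals hp]
  have hperm : vals.Perm fl := PySem.List.sorted_perm fl (fun x => x) false
  simp [hperm.nodup_iff]

-- ===== VERDICT (by name: the statement is the Claim_ definition above) =====
theorem isValidSubSection_spec : Claim_equal_isValidSubSection := by
  intro subsection _
  unfold Spec_isValidSubSection isValidSubSection
  rw [goA_eq, alt_eq_nodup]
  simp [PySem.Dict.contains, PySem.Dict.empty]
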